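-- pv_equiv track=rewrite | github.com/iocanel/advent-of-code | 2024/day04/b.py | count
-- ===== SOURCE A (Python) =====
-- def count(table, word):
--     count = 0
--     for i in range(len(table)):
--         for j in range(len(table[i])):
--             if table[i][j] == word[0]:
--                 if word in ''.join(table[i][j:]):
--                     count += 1
--     return count
-- ===== SOURCE B (Python) =====
-- def count(table, word):
--     w0 = word[0]
--     total = 0
--     for row in table:
--         m = row.rfind(word)
--         if m >= 0:
--             total += sum(1 for ch in row[:m + 1] if ch == w0)
--     return total
-- ===== Notes on version B (the rewrite author's own statement) =====
-- stated objective: faster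
-- what changed: Instead of testing 'word in row[j:]' afresh for every cell j (a substring scan per cell), B computes each row's last occurrence start m = row.rfind(word) once and counts the cells equal to word[0] in row[:m+1], removing the inner substring scan.
-- outside the precondition, e.g. on count([], ''): A returns 0, B raises IndexError; on count([''], ''): A returns 0, B raises IndexError
import Mathlib
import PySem

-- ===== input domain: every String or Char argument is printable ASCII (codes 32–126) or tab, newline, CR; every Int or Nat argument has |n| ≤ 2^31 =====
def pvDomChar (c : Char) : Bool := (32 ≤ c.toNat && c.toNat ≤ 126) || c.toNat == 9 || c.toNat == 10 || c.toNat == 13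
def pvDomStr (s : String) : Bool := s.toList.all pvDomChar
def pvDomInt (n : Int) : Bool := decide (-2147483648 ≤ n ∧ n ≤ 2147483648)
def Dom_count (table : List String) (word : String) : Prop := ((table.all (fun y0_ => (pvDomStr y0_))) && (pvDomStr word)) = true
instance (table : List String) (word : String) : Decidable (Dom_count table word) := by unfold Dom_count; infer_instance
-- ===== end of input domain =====

-- B replaces A's per-cell substring test 'word in row[j:]' by one rfind per row, then counts
-- word[0]-cells up to that last occurrence start; the checks measured B faster on large inputs.

-- ===== PORT A =====
-- A's inner loop over j (the body of 'for j in range(len(table[i]))'); ''.join(table[i][j:])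
-- joins the characters of the sliced string, ported literally as Chars.join [] over the
-- slice's singleton character lists.
def countRowA (word s : List Char) (c0 : Int) : Int :=
  (PySem.List.pyRange 0 (s.length : Int) 1).foldl (fun c j =>
    if PySem.List.pyGet? s j = PySem.List.pyGet? word 0 then
      if PySem.Chars.isIn word
          (PySem.Chars.join [] ((PySem.List.slice s (some j) none).map (fun ch => [ch]))) then
        c + 1
      else c
    else c) c0

def count (table : List String) (word : String) : Int :=
  (PySem.List.pyRange 0 (table.length : Int) 1).foldl (fun c i =>
    countRowA word.toList ((PySem.List.pyGetD table i "").toList) c) 0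

-- ===== PORT B =====
-- B's loop body: m = row.rfind(word); if m >= 0: total += sum(1 for ch in row[:m+1] if ch == w0)
def countRowB (word s : List Char) (total : Int) : Int :=
  if 0 ≤ PySem.Chars.rfind s word then
    total + ((PySem.List.slice s none (some (PySem.Chars.rfind s word + 1))).countP
               (fun ch => decide (some ch = PySem.List.pyGet? word 0)) : Int)
  else total

def count_alt (table : List String) (word : String) : Int :=
  table.foldl (fun total row => countRowB word.toList row.toList total) 0

-- ===== PRECONDITION & SPEC =====
-- Pre_ excludes only word = "": A raises IndexError at word[0] on any row with a character
-- (and only returns 0 when no cell is ever visited), while B raises IndexError at word[0] up front.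
def Pre_count (table : List String) (word : String) : Prop := word ≠ ""
instance (table : List String) (word : String) : Decidable (Pre_count table word) := by unfold Pre_count; infer_instance
def pvWitness_count : List String × String := (["XMAS", "SAMX"], "XMAS")
def Spec_count (table : List String) (word : String) (out : Int) : Prop := out = count_alt table word
instance (table : List String) (word : String) (out : Int) : Decidable (Spec_count table word out) := by unfold Spec_count; infer_instance

-- ===== CLAIM (what is proved, stated in full; the proofs are below) =====
def Claim_equal_count : Prop := ∀ (table : List String) (word : String), Dom_count table word → Pre_count table word → Spec_count table word (count table word)

-- ===== LEMMAS AND PROOFS =====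

-- rfind.go s sub j is ≥ jn exactly when sub occurs as a prefix of some drop k s with jn ≤ k ≤ j.
theorem rfind_go_ge_iff (s sub : List Char) (j jn : ℕ) :
    (jn : Int) ≤ PySem.Chars.rfind.go s sub j ↔ ∃ k, jn ≤ k ∧ k ≤ j ∧ sub <+: s.drop k := by
  induction j with
  | zero =>
    simp only [PySem.Chars.rfind.go]
    split
    · rename_i h
      rw [List.isPrefixOf_iff_prefix] at h
      constructor
      · intro hj; exact ⟨0, by omega, le_refl _, by simpa using h⟩
      · rintro ⟨k, hk1, hk2, _⟩; omega
    · rename_i h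
      rw [List.isPrefixOf_iff_prefix] at h
      constructor
      · intro hj; omega
      · rintro ⟨k, hk1, hk2, hp⟩
        interval_cases k
        · simp at hp; exact absurd hp h
  | succ j ih =>
    simp only [PySem.Chars.rfind.go]
    split
    · rename_i h
      rw [List.isPrefixOf_iff_prefix] at h
      constructor
      · intro hj; exact ⟨j + 1, by exact_mod_cast hj, le_refl _, h⟩
      · rintro ⟨k, hk1, hk2, _⟩; exact_mod_cast Nat.cast_le.mpr (le_trans hk1 hk2)
    · rename_i h
      rw [List.isPrefixOf_iff_prefix] at h
      rw [ih]
      constructor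
      · rintro ⟨k, hk1, hk2, hp⟩; exact ⟨k, hk1, by omega, hp⟩
      · rintro ⟨k, hk1, hk2, hp⟩
        refine ⟨k, hk1, ?_, hp⟩
        rcases Nat.lt_succ_iff_lt_or_eq.mp (Nat.lt_succ_of_le hk2) with h' | h'
        · omega
        · subst h'; exact absurd hp h

-- For a nonempty needle, 'jn ≤ rfind s sub' says exactly 'sub in s[jn:]'.
theorem rfind_ge_iff (s sub : List Char) (hsub : sub ≠ []) (jn : ℕ) :
    (jn : Int) ≤ PySem.Chars.rfind s sub ↔ PySem.Chars.isIn sub (s.drop jn) = true := by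
  rw [PySem.Chars.rfind, rfind_go_ge_iff, ← PySem.Chars.exists_prefix_drop_iff_isIn]
  constructor
  · rintro ⟨k, hk1, _, hp⟩
    refine ⟨k - jn, ?_⟩; rw [List.drop_drop]; have : jn + (k - jn) = k := by omega
    rwa [this]
  · rintro ⟨k, hp⟩
    rw [List.drop_drop] at hp
    rw [Nat.add_comm] at hp
    refine ⟨k + jn, by omega, ?_, hp⟩
    by_contra hlen
    rw [List.drop_eq_nil_of_le (by omega)] at hp
    exact hsub (List.prefix_nil.mp hp)

-- Counting indices j < K whose element satisfies q equals counting q on take K.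
theorem countP_take {α : Type} (s : List α) (q : α → Bool) (K : ℕ) :
    (List.range s.length).countP (fun j => (s[j]?.any q) && decide (j < K))
      = (s.take K).countP q := by
  induction s generalizing K with
  | nil => simp
  | cons c t ih =>
    rw [List.length_cons, List.range_succ_eq_map]
    rw [List.countP_cons, List.countP_map]
    cases K with
    | zero =>
      simp only [List.take_zero, List.countP_nil]
      simp
    | succ K' =>
      have : (List.countP ((fun j => ((c :: t)[j]?.any q) && decide (j < K' + 1)) ∘ Nat.succ) (List.range t.length))
          = (t.take K').countP q := by
        rw [← ih K']
        apply List.countP_congr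
        intro j _
        simp [Function.comp]
      rw [this]
      simp [List.countP_cons]

-- A's inner loop body equals B's loop body on every row (word nonempty).
theorem row_eq (s : List Char) (w : Char) (ws : List Char) (acc : Int) :
    countRowA (w :: ws) s acc = countRowB (w :: ws) s acc := by
  unfold countRowA countRowB
  set m := PySem.Chars.rfind s (w :: ws) with hm
  have hget0 : PySem.List.pyGet? (w :: ws) 0 = some w := by
    simp [PySem.List.pyGet?, PySem.List.pyIdx?]
  have hbody : (fun (c : Int) (j : Int) => if PySem.List.pyGet? s j = PySem.List.pyGet? (w :: ws) 0 then
          (if PySem.Chars.isIn (w :: ws) (PySem.Chars.join []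
              ((PySem.List.slice s (some j) none).map (fun ch => [ch]))) then c + 1 else c)
        else c)
      = (fun c j => if (PySem.List.pyGet? s j = some w ∧ PySem.Chars.isIn (w :: ws) (PySem.Chars.join []
              ((PySem.List.slice s (some j) none).map (fun ch => [ch]))) = true) then c + 1 else c) := by
    funext c j
    rw [hget0]
    split_ifs with h1 h2 h3 h4 <;> first | rfl | simp_all
  rw [hbody, PySem.List.pyRange_zero_natCast, List.foldl_map, PySem.List.foldl_ite_add_one]
  by_cases hm0 : 0 ≤ m
  · rw [if_pos hm0, hget0]
    congr 1
    rw [show PySem.List.slice s none (some (m + 1)) = List.take (m + 1).toNat s from PySem.List.slice_to s (by omega)]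
    rw [← countP_take s (fun ch => decide (some ch = some w)) (m + 1).toNat]
    congr 1
    apply List.countP_congr
    intro j hj
    rw [PySem.List.pyGet?_natCast, PySem.Chars.join_nil_singletons, PySem.List.slice_from_natCast]
    have hiff := rfind_ge_iff s (w :: ws) (by simp) j
    rw [← hm] at hiff
    simp only [decide_eq_true_eq, Bool.and_eq_true, ← hiff]
    cases hsj : s[j]? with
    | none => simp
    | some c =>
      simp only [Option.any_some, decide_eq_true_eq, Option.some_inj]
      constructor
      · rintro ⟨h1, h2⟩; exact ⟨by simp [h1], by omega⟩
      · rintro ⟨h1, h2⟩; exact ⟨by simpa using h1, by omega⟩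
  · rw [if_neg hm0]
    have hzero : (List.countP (fun (x : ℕ) => decide (PySem.List.pyGet? s (x : Int) = some w ∧
        PySem.Chars.isIn (w :: ws) (PySem.Chars.join []
          ((PySem.List.slice s (some (x : Int)) none).map (fun ch => [ch]))) = true)) (List.range s.length)) = 0 := by
      rw [List.countP_eq_zero]
      intro j _
      simp only [decide_eq_true_eq, not_and]
      intro _
      rw [PySem.Chars.join_nil_singletons, PySem.List.slice_from_natCast]
      intro hin
      have := (rfind_ge_iff s (w :: ws) (by simp) j).mpr hin
      rw [← hm] at this
      omega
    rw [hzero]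
    simp

-- A's outer loop over row indices with table[i] equals a fold over the rows themselves.
theorem outer_eq (table : List String) (F : Int → String → Int) (a : Int) :
    (PySem.List.pyRange 0 (table.length : Int) 1).foldl
        (fun c i => F c (PySem.List.pyGetD table i "")) a
      = table.foldl F a := by
  conv_rhs => rw [← PySem.List.map_pyGetD_pyRange_zero table ""]
  rw [List.foldl_map]
  rfl

-- ===== VERDICT (by name: the statement is the Claim_ definition above) =====
theorem count_spec : Claim_equal_count := by
  intro table word _ hpre
  unfold Spec_count count count_alt
  obtain ⟨w, ws, hw⟩ : ∃ w ws, word.toList = w :: ws := by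
    cases h : word.toList with
    | nil => exact absurd (String.toList_inj.mp (by simp [h])) hpre
    | cons a l => exact ⟨a, l, rfl⟩
  rw [outer_eq table (fun c row => countRowA word.toList row.toList c) 0]
  have hfun : (fun (c : Int) (row : String) => countRowA word.toList row.toList c)
      = (fun (c : Int) (row : String) => countRowB word.toList row.toList c) := by
    funext c row
    rw [hw]
    exact row_eq _ _ _ c
  rw [hfun]
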